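-- pv_equiv track=rewrite | github.com/Zion-support/zion-support.github.io | zion.app/scripts/add_batch8_clean.py | find_section_boundaries
-- ===== SOURCE A (Python) =====
-- def find_section_boundaries(lines):
--     boundaries = []
--     for i in range(len(lines)):
--         if lines[i].strip() == '];':
--             # Look ahead for a section header within next 8 lines
--             for j in range(i+1, min(i+10, len(lines))):
--                 stripped = lines[j].strip()
--                 if 'SECTION 2' in stripped:
--                     boundaries.append((i, j, 'SECTION 2: AI'))
--                     break
--                 elif 'SECTION 3' in stripped:
--                     boundaries.append((i, j, 'SECTION 3: IT'))
--                     break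
--                 elif 'SECTION 4' in stripped:
--                     boundaries.append((i, j, 'SECTION 4: SAAS'))
--                     break
--                 elif 'COMBINED EXPORT' in stripped:
--                     boundaries.append((i, j, 'COMBINED EXPORT: Consulting'))
--                     break
--     return boundaries
-- ===== SOURCE B (Python) =====
-- def find_section_boundaries(lines):
--     tokens = [('SECTION 2', 'SECTION 2: AI'),
--               ('SECTION 3', 'SECTION 3: IT'),
--               ('SECTION 4', 'SECTION 4: SAAS'),
--               ('COMBINED EXPORT', 'COMBINED EXPORT: Consulting')]
--     # one classification pass: table of (index, label) for every header line
--     headers = []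
--     for j, line in enumerate(lines):
--         stripped = line.strip()
--         for tok, label in tokens:
--             if tok in stripped:
--                 headers.append((j, label))
--                 break
--     boundaries = []
--     for i, line in enumerate(lines):
--         if line.strip() == '];':
--             for j, label in headers:
--                 if i < j < i + 10:
--                     boundaries.append((i, j, label))
--                     break
--     return boundaries
-- ===== Notes on version B (the rewrite author's own statement) =====
-- stated objective: alternative
-- what changed: B precomputes a sorted table of (index,label) headers in one classification pass and for each '];' line searches that table for the first index in the (i, i+10) window, instead of A's nested per-'];' lookahead re-classifying lines.
import Mathlib
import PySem

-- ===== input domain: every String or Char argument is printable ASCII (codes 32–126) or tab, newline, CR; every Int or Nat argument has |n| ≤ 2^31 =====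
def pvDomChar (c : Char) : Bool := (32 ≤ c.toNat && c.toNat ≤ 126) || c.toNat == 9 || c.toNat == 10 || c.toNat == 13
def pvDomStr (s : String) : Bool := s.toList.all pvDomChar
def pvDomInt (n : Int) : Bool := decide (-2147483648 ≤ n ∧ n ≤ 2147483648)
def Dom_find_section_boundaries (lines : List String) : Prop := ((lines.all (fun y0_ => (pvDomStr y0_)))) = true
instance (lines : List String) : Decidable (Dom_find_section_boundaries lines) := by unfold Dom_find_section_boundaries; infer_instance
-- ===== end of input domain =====

-- B builds the header table once and searches it per '];' line, instead of A's nested lookahead; alternative decomposition, same results.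

-- ===== PORT A =====
-- inner 'for j in range(...)' loop with break: first matching j (the if/elif chain in A's order)
def innerA (lines : List String) : List Int → Option (Int × String)
  | [] => none
  | j :: rest =>
    let stripped := PySem.Str.strip (PySem.List.pyGetD lines j "")
    if PySem.Str.isIn "SECTION 2" stripped then some (j, "SECTION 2: AI")
    else if PySem.Str.isIn "SECTION 3" stripped then some (j, "SECTION 3: IT")
    else if PySem.Str.isIn "SECTION 4" stripped then some (j, "SECTION 4: SAAS")
    else if PySem.Str.isIn "COMBINED EXPORT" stripped then some (j, "COMBINED EXPORT: Consulting")
    else innerA lines rest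

def find_section_boundaries (lines : List String) : List (Int × Int × String) :=
  (PySem.List.pyRange 0 (PySem.List.len lines) 1).foldl (fun boundaries i =>
    if PySem.Str.strip (PySem.List.pyGetD lines i "") == "];" then
      match innerA lines (PySem.List.pyRange (i+1) (min (i+10) (PySem.List.len lines)) 1) with
      | some (j, label) => boundaries ++ [(i, j, label)]
      | none => boundaries
    else boundaries) []

-- ===== PORT B =====
def fsbTokens : List (String × String) :=
  [("SECTION 2", "SECTION 2: AI"), ("SECTION 3", "SECTION 3: IT"),
   ("SECTION 4", "SECTION 4: SAAS"), ("COMBINED EXPORT", "COMBINED EXPORT: Consulting")]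

-- 'for tok, label in tokens: if tok in stripped: ... break' = first token found in the stripped line
def fsbClassify (line : String) : Option String :=
  let stripped := PySem.Str.strip line
  fsbTokens.findSome? (fun tl => if PySem.Str.isIn tl.1 stripped then some tl.2 else none)

-- first pass: table of (index, label) for every header line
def fsbHeaders (lines : List String) : List (Int × String) :=
  (PySem.List.enumerate lines).filterMap (fun p => (fsbClassify p.2).map (fun l => (p.1, l)))

def find_section_boundaries_alt (lines : List String) : List (Int × Int × String) :=
  let headers := fsbHeaders lines
  (PySem.List.enumerate lines).foldl (fun boundaries p =>
    if PySem.Str.strip p.2 == "];" then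
      match headers.find? (fun q => decide (p.1 < q.1) && decide (q.1 < p.1 + 10)) with
      | some (j, label) => boundaries ++ [(p.1, j, label)]
      | none => boundaries
    else boundaries) []

-- ===== PRECONDITION & SPEC =====
def Spec_find_section_boundaries (lines : List String) (out : List (Int × Int × String)) : Prop := out = find_section_boundaries_alt lines
instance (lines : List String) (out : List (Int × Int × String)) : Decidable (Spec_find_section_boundaries lines out) := by unfold Spec_find_section_boundaries; infer_instance

-- ===== CLAIM (what is proved, stated in full; the proofs are below) =====
def Claim_equal_find_section_boundaries : Prop := ∀ (lines : List String), Dom_find_section_boundaries lines → Spec_find_section_boundaries lines (find_section_boundaries lines)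

-- ===== LEMMAS AND PROOFS =====

theorem fsb_find?_congr {α : Type} (l : List α) (p q : α → Bool) (h : ∀ x ∈ l, p x = q x) :
    l.find? p = l.find? q := by
  induction l with
  | nil => rfl
  | cons x xs ih =>
    simp only [List.find?_cons, h x (by simp)]
    cases q x
    · exact ih (fun y hy => h y (by simp [hy]))
    · rfl

theorem innerA_cons (lines : List String) (j : Int) (rest : List Int) :
    innerA lines (j :: rest) =
      match fsbClassify (PySem.List.pyGetD lines j "") with
      | some l => some (j, l)
      | none => innerA lines rest := by
  simp only [innerA, fsbClassify, fsbTokens, List.findSome?]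
  split_ifs <;> rfl

theorem mem_fsbHeaders {lines : List String} {q : Int × String} (hq : q ∈ fsbHeaders lines) :
    ∃ (k : Nat) (h : k < lines.length), q.1 = (k : Int) ∧ fsbClassify lines[k] = some q.2 := by
  unfold fsbHeaders at hq
  rcases List.mem_filterMap.mp hq with ⟨p, hp, hf⟩
  rcases (PySem.List.mem_enumerate_iff lines 0 p).mp hp with ⟨k, hk, rfl⟩
  rcases Option.map_eq_some_iff.mp hf with ⟨l, hl, rfl⟩
  exact ⟨k, hk, by simp, by simpa using hl⟩

theorem fsbHeaders_index_lt {lines : List String} {q : Int × String} (hq : q ∈ fsbHeaders lines) :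
    0 ≤ q.1 ∧ q.1 < (lines.length : Int) := by
  rcases mem_fsbHeaders hq with ⟨k, hk, hq1, -⟩
  omega

-- the window scan of A equals searching the precomputed header table inside the window
theorem innerA_eq_find? (lines : List String) (b : Int) (hb : b ≤ (lines.length : Int)) :
    ∀ (m : Nat) (a : Int), 0 ≤ a → (b - a).toNat ≤ m →
      innerA lines (PySem.List.pyRange a b 1) =
        (fsbHeaders lines).find? (fun q => decide (a ≤ q.1) && decide (q.1 < b)) := by
  intro m
  induction m with
  | zero =>
    intro a ha hm
    have hba : b ≤ a := by omega
    rw [PySem.List.pyRange_one_eq_nil hba]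
    simp only [innerA]
    symm
    rw [List.find?_eq_none]
    intro q _
    simp only [Bool.and_eq_true, decide_eq_true_eq, not_and]
    intro h1
    omega
  | succ m ih =>
    intro a ha hm
    by_cases hab : b ≤ a
    · rw [PySem.List.pyRange_one_eq_nil hab]
      simp only [innerA]
      symm
      rw [List.find?_eq_none]
      intro q _
      simp only [Bool.and_eq_true, decide_eq_true_eq, not_and]
      intro h1
      omega
    · have hab : a < b := by omega
      have halen : a < (lines.length : Int) := lt_of_lt_of_le hab hb
      have hknat : a.toNat < lines.length := by omega
      have hget : PySem.List.pyGetD lines a "" = lines[a.toNat] :=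
        PySem.List.pyGetD_eq_getElem lines "" ha (by omega)
      rw [PySem.List.pyRange_one_cons hab, innerA_cons, hget]
      cases hc : fsbClassify lines[a.toNat] with
      | none =>
        simp only []
        rw [ih (a + 1) (by omega) (by omega)]
        apply fsb_find?_congr
        intro q hq
        rcases mem_fsbHeaders hq with ⟨k, hk, hq1, hcl⟩
        have hne : q.1 ≠ a := by
          intro he
          have hka : k = a.toNat := by omega
          subst hka
          rw [hc] at hcl
          simp at hcl
        have : (a + 1 ≤ q.1) ↔ (a ≤ q.1) := by omega
        simp only [decide_eq_decide.mpr this]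
      | some l =>
        simp only []
        -- split the header table at index a
        have hsplit : lines = lines.take a.toNat ++ lines[a.toNat] :: lines.drop (a.toNat + 1) := by
          conv_lhs => rw [← List.take_append_drop a.toNat lines]
          rw [List.drop_eq_getElem_cons hknat]
        have htlen : (lines.take a.toNat).length = a.toNat := by
          simp [Nat.min_eq_left (Nat.le_of_lt hknat)]
        symm
        conv_lhs => rw [show fsbHeaders lines =
            (PySem.List.enumerate (lines.take a.toNat) 0).filterMap
              (fun p => (fsbClassify p.2).map (fun l => (p.1, l))) ++
            ((a : Int), l) ::
            (PySem.List.enumerate (lines.drop (a.toNat + 1)) (a + 1)).filterMap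
              (fun p => (fsbClassify p.2).map (fun l => (p.1, l))) from by
          conv_lhs => rw [fsbHeaders, hsplit]
          rw [PySem.List.enumerate_append, PySem.List.enumerate_cons, List.filterMap_append,
            List.filterMap_cons]
          simp only [hc, Option.map_some, htlen]
          have h0a : (0:Int) + (a.toNat:Int) = a := by omega
          rw [h0a]]
        rw [List.find?_append]
        have hpre : (List.find? (fun q => decide (a ≤ q.1) && decide (q.1 < b))
            ((PySem.List.enumerate (lines.take a.toNat) 0).filterMap
              (fun p => (fsbClassify p.2).map (fun l => (p.1, l))))) = none := by
          rw [List.find?_eq_none]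
          intro q hq
          rcases List.mem_filterMap.mp hq with ⟨p, hp, hf⟩
          rcases (PySem.List.mem_enumerate_iff _ 0 p).mp hp with ⟨k, hk, rfl⟩
          rcases Option.map_eq_some_iff.mp hf with ⟨l', _, rfl⟩
          simp only [Bool.and_eq_true, decide_eq_true_eq, not_and]
          intro h1
          rw [htlen] at hk
          exfalso
          simp only [zero_add] at h1
          omega
        rw [hpre]
        simp only [Option.none_or, List.find?_cons]
        have hpred : (decide (a ≤ (a : Int)) && decide ((a : Int) < b)) = true := by
          simp only [Bool.and_eq_true, decide_eq_true_eq]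
          omega
        rw [hpred]

-- ===== VERDICT (by name: the statement is the Claim_ definition above) =====
theorem find_section_boundaries_spec : Claim_equal_find_section_boundaries := by
  intro lines _
  unfold Spec_find_section_boundaries find_section_boundaries find_section_boundaries_alt
  rw [PySem.List.enumerate_eq_map_pyRange lines "", List.foldl_map]
  apply PySem.List.foldl_congr_mem
  intro acc i hi
  rcases (PySem.List.mem_pyRange_one).mp hi with ⟨h0, hlen⟩
  simp only []
  by_cases hcond : PySem.Str.strip (PySem.List.pyGetD lines i "") == "];"
  · simp only [hcond, if_true]
    have hwin : innerA lines (PySem.List.pyRange (i + 1) (min (i + 10) (PySem.List.len lines)) 1) =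
        (fsbHeaders lines).find? (fun q => decide (i < q.1) && decide (q.1 < i + 10)) := by
      rw [innerA_eq_find? lines (min (i + 10) (PySem.List.len lines))
        (by simp [PySem.List.len_eq]) ((min (i + 10) (PySem.List.len lines) - (i + 1)).toNat)
        (i + 1) (by omega) (le_refl _)]
      apply fsb_find?_congr
      intro q hq
      have hql := fsbHeaders_index_lt hq
      have h1 : (i + 1 ≤ q.1) ↔ (i < q.1) := by omega
      have h2 : (q.1 < min (i + 10) (PySem.List.len lines)) ↔ (q.1 < i + 10) := by
        simp only [PySem.List.len_eq] at *
        omega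
      rw [decide_eq_decide.mpr h1, decide_eq_decide.mpr h2]
    rw [hwin]
  · simp [hcond]
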